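-- pv_equiv track=rewrite | github.com/palm7710/algorithm | ex_app/2025_12_24/2.py | solution
-- ===== SOURCE A (Python) =====
-- def solution(cards, moves, query):
--     # TODO: Implement me!
--     # cards: [カードID, 行インデックス, 列インデックス]
--     # moves: [カードID, 移動前の行インデックス, 移動前の列インデックス, 移動先の行インデックス, 移動先の列インデックス]
--     # query: 直接動かす対象となるカードのID
--     # ans: queryで指定されたカードの最終的な位置を [行のインデックス, 列のインデックス]
--
--     row, col = None, None
--     for i, r, c in cards:
--         if i == query:
--             row, col = r, c
--             break
--
--     for i in moves:
--         c_id, r, c, fr, fc = i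
--         if c_id == query:
--             row, col = fr, fc
--
--     return [row, col]
-- ===== SOURCE B (Python) =====
-- def solution(cards, moves, query):
--     # Simulate the whole board: build a dict id -> position for every card
--     # (setdefault keeps the first occurrence of an id), apply every move to
--     # the dict unconditionally, then answer the query with a single lookup.
--     pos = {}
--     for i, r, c in cards:
--         pos.setdefault(i, (r, c))
--     for c_id, r, c, fr, fc in moves:
--         pos[c_id] = (fr, fc)
--     p = pos.get(query)
--     return [p[0], p[1]] if p is not None else [None, None]
-- ===== Notes on version B (the rewrite author's own statement) =====
-- stated objective: alternative
-- what changed: B simulates the whole board in a dictionary id->position (built from all cards, updated by every move regardless of id) and answers with one final lookup, instead of A's query-filtered scans over cards and moves.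
-- outside the precondition, e.g. on solution([], [], 1): A returns [None, None], B returns [None, None]
import Mathlib
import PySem

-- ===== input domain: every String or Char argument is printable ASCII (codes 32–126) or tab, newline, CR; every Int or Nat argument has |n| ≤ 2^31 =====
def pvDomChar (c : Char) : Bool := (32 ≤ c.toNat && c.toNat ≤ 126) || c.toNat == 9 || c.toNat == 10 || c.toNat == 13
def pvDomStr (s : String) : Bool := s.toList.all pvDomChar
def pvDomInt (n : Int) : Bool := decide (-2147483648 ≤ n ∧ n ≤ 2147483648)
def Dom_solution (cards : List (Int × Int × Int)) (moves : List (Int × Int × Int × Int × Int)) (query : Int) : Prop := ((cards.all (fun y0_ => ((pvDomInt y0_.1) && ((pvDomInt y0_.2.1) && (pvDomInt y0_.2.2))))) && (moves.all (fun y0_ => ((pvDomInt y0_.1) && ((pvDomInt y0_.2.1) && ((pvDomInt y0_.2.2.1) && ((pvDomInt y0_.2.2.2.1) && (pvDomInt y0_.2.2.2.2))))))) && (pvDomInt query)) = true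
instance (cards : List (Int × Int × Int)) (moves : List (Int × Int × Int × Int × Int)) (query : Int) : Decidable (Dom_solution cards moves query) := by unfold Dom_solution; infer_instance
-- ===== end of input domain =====

-- B simulates the whole board in a dictionary id -> position (built from all cards,
-- updated by every move regardless of id) and answers with one final lookup; A scans
-- only for the queried id. Same result on Pre_ (where the result is a pair of ints).

-- ===== PORT A =====
-- first loop with break = first match in cards; row/col start as None (Option Int).
-- second loop: forward fold over moves, overwriting on every match.
-- Outside Pre_, Python A returns [None, None] (not an int list); the port's
-- `getD 0` there is never claimed (Pre_ excludes those inputs).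
def solution (cards : List (Int × Int × Int)) (moves : List (Int × Int × Int × Int × Int)) (query : Int) : List Int :=
  let init : Option Int × Option Int :=
    match cards.find? (fun t => t.1 == query) with
    | some t => (some t.2.1, some t.2.2)
    | none => (none, none)
  let rc := moves.foldl
    (fun (st : Option Int × Option Int) m =>
      if m.1 == query then (some m.2.2.2.1, some m.2.2.2.2) else st) init
  [rc.1.getD 0, rc.2.getD 0]

-- ===== PORT B =====
-- build the dict of every card's position (setdefault keeps the first occurrence),
-- apply every move unconditionally, then one lookup. Python B returns [None, None]
-- when the query is absent from the dict; that branch is outside Pre_, the port's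
-- [0, 0] there is never claimed.
def solution_alt (cards : List (Int × Int × Int)) (moves : List (Int × Int × Int × Int × Int)) (query : Int) : List Int :=
  let pos0 : PySem.Dict Int (Int × Int) :=
    cards.foldl (fun d t => d.setdefault t.1 (t.2.1, t.2.2)) PySem.Dict.empty
  let pos : PySem.Dict Int (Int × Int) :=
    moves.foldl (fun d m => d.insert m.1 (m.2.2.2.1, m.2.2.2.2)) pos0
  match pos.get? query with
  | some p => [p.1, p.2]
  | none => [0, 0]

-- ===== PRECONDITION & SPEC =====
-- Pre_ excludes inputs where the queried card occurs in neither cards nor moves: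
-- there both Pythons return [None, None], which is not a value of type List Int.
def Pre_solution (cards : List (Int × Int × Int)) (moves : List (Int × Int × Int × Int × Int)) (query : Int) : Prop :=
  (∃ t ∈ cards, t.1 = query) ∨ (∃ m ∈ moves, m.1 = query)
instance (cards : List (Int × Int × Int)) (moves : List (Int × Int × Int × Int × Int)) (query : Int) : Decidable (Pre_solution cards moves query) := by unfold Pre_solution; infer_instance
def pvWitness_solution : (List (Int × Int × Int)) × (List (Int × Int × Int × Int × Int)) × Int := ([(1, 0, 0)], [(1, 0, 0, 2, 3)], 1)
def Spec_solution (cards : List (Int × Int × Int)) (moves : List (Int × Int × Int × Int × Int)) (query : Int) (out : List Int) : Prop := out = solution_alt cards moves query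
instance (cards : List (Int × Int × Int)) (moves : List (Int × Int × Int × Int × Int)) (query : Int) (out : List Int) : Decidable (Spec_solution cards moves query out) := by unfold Spec_solution; infer_instance

-- ===== CLAIM (what is proved, stated in full; the proofs are below) =====
def Claim_equal_solution : Prop := ∀ (cards : List (Int × Int × Int)) (moves : List (Int × Int × Int × Int × Int)) (query : Int), Dom_solution cards moves query → Pre_solution cards moves query → Spec_solution cards moves query (solution cards moves query)

-- ===== LEMMAS AND PROOFS =====

-- A's query-filtered forward overwrite-fold over moves ends at the last matching move.
theorem foldl_overwrite_eq_reverse_find (query : Int)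
    (moves : List (Int × Int × Int × Int × Int)) (st : Option Int × Option Int) :
    moves.foldl
      (fun (st : Option Int × Option Int) m =>
        if m.1 == query then (some m.2.2.2.1, some m.2.2.2.2) else st) st
    = match moves.reverse.find? (fun m => m.1 == query) with
      | some m => (some m.2.2.2.1, some m.2.2.2.2)
      | none => st := by
  induction moves using List.reverseRecOn with
  | nil => simp
  | append_singleton ms m ih =>
    simp only [List.foldl_append, List.foldl_cons, List.foldl_nil, List.reverse_append,
      List.reverse_cons, List.reverse_nil, List.nil_append, List.cons_append, List.find?_cons]
    cases h : (m.1 == query) with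
    | true => simp only [if_true]
    | false => simp only [Bool.false_eq_true, if_false]; exact ih

-- Looking up `query` after B's unconditional move-fold: the last move with that id
-- wins, otherwise the dict is unchanged at `query`.
theorem get?_foldl_insert_moves (query : Int)
    (moves : List (Int × Int × Int × Int × Int)) (d : PySem.Dict Int (Int × Int)) :
    (moves.foldl (fun d m => d.insert m.1 (m.2.2.2.1, m.2.2.2.2)) d).get? query
    = match moves.reverse.find? (fun m => m.1 == query) with
      | some m => some (m.2.2.2.1, m.2.2.2.2)
      | none => d.get? query := by
  induction moves using List.reverseRecOn generalizing d with
  | nil => simp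
  | append_singleton ms m ih =>
    simp only [List.foldl_append, List.foldl_cons, List.foldl_nil, List.reverse_append,
      List.reverse_cons, List.reverse_nil, List.nil_append, List.cons_append, List.find?_cons]
    cases h : (m.1 == query) with
    | true =>
      have hq : query = m.1 := (beq_iff_eq.mp h).symm
      simp [hq, PySem.Dict.get?_insert_self]
    | false =>
      have hne : query ≠ m.1 := fun he => by simp [he] at h
      rw [PySem.Dict.get?_insert_of_ne _ _ hne]
      exact ih d

-- Looking up `query` after B's setdefault-fold over cards: an earlier binding wins,
-- otherwise the first card with that id.
theorem get?_foldl_setdefault_cards (query : Int)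
    (cards : List (Int × Int × Int)) (d : PySem.Dict Int (Int × Int)) :
    (cards.foldl (fun d t => d.setdefault t.1 (t.2.1, t.2.2)) d).get? query
    = match d.get? query with
      | some v => some v
      | none => (cards.find? (fun t => t.1 == query)).map (fun t => (t.2.1, t.2.2)) := by
  induction cards generalizing d with
  | nil => rcases h : d.get? query with _ | v <;> simp [h]
  | cons t ts ih =>
    simp only [List.foldl_cons, List.find?_cons]
    by_cases hq : t.1 = query
    · subst hq
      rw [ih, PySem.Dict.get?_setdefault_self]
      rcases hd : d.get? t.1 with _ | v <;> simp
    · have hne : query ≠ t.1 := Ne.symm hq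
      have hb : (t.1 == query) = false := by simp [hq]
      rw [ih, PySem.Dict.get?_setdefault_of_ne _ _ hne, hb]

theorem solution_spec : Claim_equal_solution := by
  intro cards moves query _hdom hpre
  unfold Spec_solution solution solution_alt
  simp only [foldl_overwrite_eq_reverse_find, get?_foldl_insert_moves,
    get?_foldl_setdefault_cards, PySem.Dict.get?_empty]
  rcases hfm : moves.reverse.find? (fun m => m.1 == query) with _ | m
  · rcases hfc : cards.find? (fun t => t.1 == query) with _ | t
    · exfalso
      rcases hpre with ⟨t, ht, hq⟩ | ⟨m, hm, hq⟩
      · have := List.find?_eq_none.mp hfc t ht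
        simp [hq] at this
      · have := List.find?_eq_none.mp hfm m (by simp [hm])
        simp [hq] at this
    · simp [hfm, hfc]
  · simp [hfm]
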